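-- pv_equiv track=rewrite | github.com/8veer/hummingbot | scripts/pcr/calculations.py | calculate_thresholds
-- ===== SOURCE A (Python) =====
-- def calculate_thresholds(spot_price):
--     # Define ranges and corresponding step magnitudes
--     ranges_and_steps = [(50, 5), (100, 10), (800, 50), (3000, 100), (5000, 200), (20000, 500), (50000, 1000)]
--
--     # Determine the appropriate step magnitude for the given stock price
--     for price_limit, step_magnitude in ranges_and_steps:
--         if spot_price < price_limit:
--             break
--     else:
--         step_magnitude = 2000  # Default step for prices above the highest range
--
--     # Calculate thresholds
--     lower_threshold = spot_price - (spot_price % step_magnitude)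
--     upper_threshold = lower_threshold + step_magnitude
--
--     distance1 = abs(spot_price - lower_threshold)
--     distance2 = abs(spot_price - upper_threshold)
--
--     if distance1 < distance2:
--         return lower_threshold
--     else:
--         return upper_threshold
-- ===== SOURCE B (Python) =====
-- def calculate_thresholds(spot_price):
--     # Binary search the step table, then round to nearest step in closed form (ties up).
--     limits = [50, 100, 800, 3000, 5000, 20000, 50000]
--     steps = [5, 10, 50, 100, 200, 500, 1000]
--     lo, hi = 0, len(limits)
--     while lo < hi:
--         mid = (lo + hi) // 2
--         if spot_price < limits[mid]:
--             hi = mid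
--         else:
--             lo = mid + 1
--     step = steps[lo] if lo < len(steps) else 2000
--     return ((spot_price + step // 2) // step) * step
-- ===== Notes on version B (the rewrite author's own statement) =====
-- stated objective: alternative
-- what changed: Step selection becomes a hand-written binary search over the limits table instead of a linear for/else scan, and the lower/upper-threshold distance comparison is replaced by a single closed-form round-to-nearest-multiple ((p + step//2)//step)*step with ties to the upper threshold.
import Mathlib
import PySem

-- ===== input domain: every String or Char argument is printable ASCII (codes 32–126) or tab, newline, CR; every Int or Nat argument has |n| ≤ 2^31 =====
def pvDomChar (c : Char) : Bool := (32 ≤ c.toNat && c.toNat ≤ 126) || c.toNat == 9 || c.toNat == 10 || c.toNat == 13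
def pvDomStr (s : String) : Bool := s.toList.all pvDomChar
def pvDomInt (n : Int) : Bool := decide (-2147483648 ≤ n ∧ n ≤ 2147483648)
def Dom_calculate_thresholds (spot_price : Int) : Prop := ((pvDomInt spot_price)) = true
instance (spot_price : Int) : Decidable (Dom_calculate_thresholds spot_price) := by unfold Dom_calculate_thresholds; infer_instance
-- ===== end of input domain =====

-- B replaces A's linear for/else table scan by a binary search and the two-threshold
-- distance comparison by a closed-form round-to-nearest-multiple (alternative, same cost).

-- ===== PORT A =====
-- the for ... else loop: first step whose limit exceeds the price, default 2000
def pvSelA (sp : Int) : List (Int × Int) → Int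
  | [] => 2000
  | (price_limit, step_magnitude) :: rest =>
      if sp < price_limit then step_magnitude else pvSelA sp rest

def calculate_thresholds (spot_price : Int) : Int :=
  let step_magnitude := pvSelA spot_price
    [(50, 5), (100, 10), (800, 50), (3000, 100), (5000, 200), (20000, 500), (50000, 1000)]
  let lower_threshold := spot_price - PySem.Int.mod spot_price step_magnitude
  let upper_threshold := lower_threshold + step_magnitude
  let distance1 := |spot_price - lower_threshold|
  let distance2 := |spot_price - upper_threshold|
  if distance1 < distance2 then lower_threshold else upper_threshold

-- ===== PORT B =====
-- the while-loop binary search of Source B (lo/hi halving); getD is exact: indices are in range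
def pvBSearch (limits : List Int) (sp : Int) (lo hi : Nat) : Nat :=
  if h : lo < hi then
    let mid := (lo + hi) / 2
    if sp < limits.getD mid 0 then pvBSearch limits sp lo mid
    else pvBSearch limits sp (mid + 1) hi
  else lo
termination_by hi - lo
decreasing_by all_goals omega

def calculate_thresholds_alt (spot_price : Int) : Int :=
  let limits : List Int := [50, 100, 800, 3000, 5000, 20000, 50000]
  let steps : List Int := [5, 10, 50, 100, 200, 500, 1000]
  let lo := pvBSearch limits spot_price 0 limits.length
  let step := if lo < steps.length then steps.getD lo 0 else 2000
  PySem.Int.floordiv (spot_price + PySem.Int.floordiv step 2) step * step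

-- ===== PRECONDITION & SPEC =====
def Spec_calculate_thresholds (spot_price : Int) (out : Int) : Prop := out = calculate_thresholds_alt spot_price
instance (spot_price : Int) (out : Int) : Decidable (Spec_calculate_thresholds spot_price out) := by unfold Spec_calculate_thresholds; infer_instance

-- ===== CLAIM (what is proved, stated in full; the proofs are below) =====
def Claim_equal_calculate_thresholds : Prop := ∀ (spot_price : Int), Dom_calculate_thresholds spot_price → Spec_calculate_thresholds spot_price (calculate_thresholds spot_price)

-- ===== LEMMAS AND PROOFS =====

-- A's lower/upper-threshold choice equals B's closed-form rounding, for each step in the table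
lemma pvRound (sp step : Int)
    (hs : step = 5 ∨ step = 10 ∨ step = 50 ∨ step = 100 ∨ step = 200 ∨ step = 500 ∨ step = 1000 ∨ step = 2000) :
    (if |sp - (sp - PySem.Int.mod sp step)| < |sp - (sp - PySem.Int.mod sp step + step)|
     then sp - PySem.Int.mod sp step
     else sp - PySem.Int.mod sp step + step)
    = PySem.Int.floordiv (sp + PySem.Int.floordiv step 2) step * step := by
  have hpos : (0:Int) < step := by rcases hs with h|h|h|h|h|h|h|h <;> omega
  rw [PySem.Int.mod_eq_emod_of_pos hpos,
      PySem.Int.floordiv_eq_ediv_of_pos hpos,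
      PySem.Int.floordiv_eq_ediv_of_pos (show (0:Int) < 2 by norm_num)]
  have h1 : 0 ≤ sp % step := Int.emod_nonneg sp (by omega)
  have h2 : sp % step < step := Int.emod_lt_of_pos sp hpos
  have e1 : sp - (sp - sp % step) = sp % step := by ring
  have e2 : sp - (sp - sp % step + step) = sp % step - step := by ring
  rw [e1, e2, abs_of_nonneg h1, abs_of_nonpos (by omega)]
  rcases hs with h|h|h|h|h|h|h|h <;> subst h <;> split_ifs <;> omega

lemma pv_key (sp : Int) : calculate_thresholds sp = calculate_thresholds_alt sp := by
  unfold calculate_thresholds calculate_thresholds_alt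
  by_cases c1 : sp < 50
  · have hA : pvSelA sp [(50, 5), (100, 10), (800, 50), (3000, 100), (5000, 200), (20000, 500), (50000, 1000)] = 5 := by simp [pvSelA, c1]
    have hB : pvBSearch ([50, 100, 800, 3000, 5000, 20000, 50000] : List Int) sp 0 7 = 0 := by simp [pvBSearch, c1, show sp < 3000 by omega, show sp < 100 by omega]
    simp only [List.length_cons, List.length_nil, Nat.reduceAdd, hA, hB, Nat.reduceLT,
      reduceIte, List.getD_cons_zero]
    exact pvRound sp 5 (by norm_num)
  · 
    by_cases c2 : sp < 100
    · have hA : pvSelA sp [(50, 5), (100, 10), (800, 50), (3000, 100), (5000, 200), (20000, 500), (50000, 1000)] = 10 := by simp [pvSelA, c1, c2]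
      have hB : pvBSearch ([50, 100, 800, 3000, 5000, 20000, 50000] : List Int) sp 0 7 = 1 := by simp [pvBSearch, c1, c2, show sp < 3000 by omega]
      simp only [List.length_cons, List.length_nil, Nat.reduceAdd, hA, hB, Nat.reduceLT,
        reduceIte, List.getD_cons_zero, List.getD_cons_succ]
      exact pvRound sp 10 (by norm_num)
    · 
      by_cases c3 : sp < 800
      · have hA : pvSelA sp [(50, 5), (100, 10), (800, 50), (3000, 100), (5000, 200), (20000, 500), (50000, 1000)] = 50 := by simp [pvSelA, c1, c2, c3]
        have hB : pvBSearch ([50, 100, 800, 3000, 5000, 20000, 50000] : List Int) sp 0 7 = 2 := by simp [pvBSearch, c2, c3, show sp < 3000 by omega]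
        simp only [List.length_cons, List.length_nil, Nat.reduceAdd, hA, hB, Nat.reduceLT,
          reduceIte, List.getD_cons_zero, List.getD_cons_succ]
        exact pvRound sp 50 (by norm_num)
      · 
        by_cases c4 : sp < 3000
        · have hA : pvSelA sp [(50, 5), (100, 10), (800, 50), (3000, 100), (5000, 200), (20000, 500), (50000, 1000)] = 100 := by simp [pvSelA, c1, c2, c3, c4]
          have hB : pvBSearch ([50, 100, 800, 3000, 5000, 20000, 50000] : List Int) sp 0 7 = 3 := by simp [pvBSearch, c2, c3, c4]
          simp only [List.length_cons, List.length_nil, Nat.reduceAdd, hA, hB, Nat.reduceLT,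
            reduceIte, List.getD_cons_zero, List.getD_cons_succ]
          exact pvRound sp 100 (by norm_num)
        · 
          by_cases c5 : sp < 5000
          · have hA : pvSelA sp [(50, 5), (100, 10), (800, 50), (3000, 100), (5000, 200), (20000, 500), (50000, 1000)] = 200 := by simp [pvSelA, c1, c2, c3, c4, c5]
            have hB : pvBSearch ([50, 100, 800, 3000, 5000, 20000, 50000] : List Int) sp 0 7 = 4 := by simp [pvBSearch, c4, c5, show sp < 20000 by omega]
            simp only [List.length_cons, List.length_nil, Nat.reduceAdd, hA, hB, Nat.reduceLT,
              reduceIte, List.getD_cons_zero, List.getD_cons_succ]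
            exact pvRound sp 200 (by norm_num)
          · 
            by_cases c6 : sp < 20000
            · have hA : pvSelA sp [(50, 5), (100, 10), (800, 50), (3000, 100), (5000, 200), (20000, 500), (50000, 1000)] = 500 := by simp [pvSelA, c1, c2, c3, c4, c5, c6]
              have hB : pvBSearch ([50, 100, 800, 3000, 5000, 20000, 50000] : List Int) sp 0 7 = 5 := by simp [pvBSearch, c4, c5, c6]
              simp only [List.length_cons, List.length_nil, Nat.reduceAdd, hA, hB, Nat.reduceLT,
                reduceIte, List.getD_cons_zero, List.getD_cons_succ]
              exact pvRound sp 500 (by norm_num)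
            · 
              by_cases c7 : sp < 50000
              · have hA : pvSelA sp [(50, 5), (100, 10), (800, 50), (3000, 100), (5000, 200), (20000, 500), (50000, 1000)] = 1000 := by simp [pvSelA, c1, c2, c3, c4, c5, c6, c7]
                have hB : pvBSearch ([50, 100, 800, 3000, 5000, 20000, 50000] : List Int) sp 0 7 = 6 := by simp [pvBSearch, c4, c6, c7]
                simp only [List.length_cons, List.length_nil, Nat.reduceAdd, hA, hB, Nat.reduceLT,
                  reduceIte, List.getD_cons_zero, List.getD_cons_succ]
                exact pvRound sp 1000 (by norm_num)
              · have hA : pvSelA sp [(50, 5), (100, 10), (800, 50), (3000, 100), (5000, 200), (20000, 500), (50000, 1000)] = 2000 := by simp [pvSelA, c1, c2, c3, c4, c5, c6, c7]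
                have hB : pvBSearch ([50, 100, 800, 3000, 5000, 20000, 50000] : List Int) sp 0 7 = 7 := by simp [pvBSearch, c4, c6, c7]
                simp only [List.length_cons, List.length_nil, Nat.reduceAdd, hA, hB, Nat.reduceLT,
                  reduceIte, List.getD_cons_succ]
                exact pvRound sp 2000 (by norm_num)

-- ===== VERDICT (by name: the statement is the Claim_ definition above) =====
theorem calculate_thresholds_spec : Claim_equal_calculate_thresholds := by
  intro sp _
  unfold Spec_calculate_thresholds
  exact pv_key sp
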